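-- pv_equiv track=rewrite | github.com/databrickslabs/dbldatagen | dbldatagen/v1/engine/cdc_stateless.py | delete_indices_at_batch_fast
-- ===== SOURCE A (Python) =====
-- import math
--
-- def max_k_at_batch(
--     batch_n: int,
--     initial_rows: int,
--     inserts_per_batch: int,
-- ) -> int:
--     """Return the exclusive upper bound on k values that exist at batch *batch_n*.
--
--     This is the total number of rows ever created up to and including batch_n.
--     """
--     if batch_n <= 0:
--         return initial_rows
--     return initial_rows + batch_n * inserts_per_batch
--
-- def delete_indices_at_batch_fast(
--     batch_n: int,
--     initial_rows: int,
--     inserts_per_batch: int,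
--     death_period: int | float,
--     min_life: int = 1,
-- ) -> list[int]:
--     """Optimised version using stride scanning.
--
--     For each possible birth tick t_b, compute the required k % dp value
--     and scan at stride dp.  Much faster than brute-force for large tables.
--     """
--     if math.isinf(death_period) or batch_n <= 0:
--         return []
--     dp = int(death_period)
--     if dp <= 0:
--         return []
--
--     upper_k = max_k_at_batch(batch_n, initial_rows, inserts_per_batch)
--     result = []
--
--     # For initial rows (t_birth = 0): death_tick = min_life + (k % dp)
--     # So k % dp == batch_n - min_life
--     # For inserted rows at batch t_b: death_tick = t_b + min_life + (k % dp)
--     # So k % dp == batch_n - t_b - min_life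
--
--     # Determine which birth ticks could produce deaths at batch_n
--     # t_birth can be 0..batch_n (rows must be born before or at batch_n)
--     # but death_tick >= t_birth + min_life, so t_birth <= batch_n - min_life
--     max_birth = batch_n - min_life
--     if max_birth < 0:
--         return []
--
--     # Iterate over possible birth ticks
--     for t_b in range(0, max_birth + 1):
--         target_mod = batch_n - t_b - min_life
--         if target_mod < 0 or target_mod >= dp:
--             continue
--
--         # k values born at t_b with k % dp == target_mod
--         if t_b == 0:
--             k_start = 0
--             k_end = initial_rows
--         else:
--             if inserts_per_batch <= 0:
--                 continue
--             k_start = initial_rows + (t_b - 1) * inserts_per_batch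
--             k_end = k_start + inserts_per_batch
--
--         k_end = min(k_end, upper_k)
--
--         # Find first k >= k_start with k % dp == target_mod
--         if k_start <= 0:
--             first_k = target_mod
--         else:
--             remainder = k_start % dp
--             if remainder <= target_mod:
--                 first_k = k_start + (target_mod - remainder)
--             else:
--                 first_k = k_start + (dp - remainder + target_mod)
--
--         # Stride through valid k values
--         k = first_k
--         while k < k_end:
--             result.append(k)
--             k += dp
--
--     result.sort()
--     return result
-- ===== SOURCE B (Python) =====
-- import math
--
-- def delete_indices_at_batch_fast(
--     batch_n: int,
--     initial_rows: int,
--     inserts_per_batch: int,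
--     death_period,
--     min_life: int = 1,
-- ) -> list[int]:
--     """Index-major scan: instead of iterating birth ticks and emitting stride
--     progressions, enumerate the contiguous window of row indices k whose birth
--     tick can still die at batch_n, recover each k's birth tick by floor division,
--     and keep k iff birth_tick + min_life + (k % dp) == batch_n.  The output is
--     produced already sorted, so no sort step is needed."""
--     if math.isinf(death_period) or batch_n <= 0:
--         return []
--     dp = int(death_period)
--     if dp <= 0:
--         return []
--     need = batch_n - min_life          # t_birth + (k % dp) must equal `need`
--     if need < 0:
--         return []
--     upper_k = initial_rows + batch_n * inserts_per_batch
--     out = []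
--     # initial rows are born at tick 0: they die now iff k % dp == need
--     if need < dp:
--         out = [k for k in range(0, min(initial_rows, upper_k)) if k % dp == need]
--     # inserted rows: row k has birth tick 1 + (k - initial_rows) // inserts_per_batch
--     if inserts_per_batch > 0:
--         t_lo = max(1, need - dp + 1)   # earliest inserted birth tick that can die now
--         if t_lo <= need:
--             k_lo = initial_rows + (t_lo - 1) * inserts_per_batch
--             k_hi = min(initial_rows + need * inserts_per_batch, upper_k)
--             out.extend(k for k in range(k_lo, k_hi)
--                        if 1 + (k - initial_rows) // inserts_per_batch + k % dp == need)
--     return out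
-- ===== Notes on version B (the rewrite author's own statement) =====
-- stated objective: alternative
-- what changed: B inverts the loop: instead of iterating birth ticks and emitting a stride progression per tick (then sorting), it scans the contiguous window of row indices k that can die at batch_n, recovers each k's birth tick by floor division, and filters by birth_tick + min_life + k%dp == batch_n, producing the output already sorted with no sort step.
-- outside the precondition, e.g. on delete_indices_at_batch_fast(3, -5, 2, 3, 1): A returns [], B returns [-5, -3]; on delete_indices_at_batch_fast(6, -4, 3, 5, 1): A returns [2, 6, 10], B returns [2, 6, 10]
import Mathlib
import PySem

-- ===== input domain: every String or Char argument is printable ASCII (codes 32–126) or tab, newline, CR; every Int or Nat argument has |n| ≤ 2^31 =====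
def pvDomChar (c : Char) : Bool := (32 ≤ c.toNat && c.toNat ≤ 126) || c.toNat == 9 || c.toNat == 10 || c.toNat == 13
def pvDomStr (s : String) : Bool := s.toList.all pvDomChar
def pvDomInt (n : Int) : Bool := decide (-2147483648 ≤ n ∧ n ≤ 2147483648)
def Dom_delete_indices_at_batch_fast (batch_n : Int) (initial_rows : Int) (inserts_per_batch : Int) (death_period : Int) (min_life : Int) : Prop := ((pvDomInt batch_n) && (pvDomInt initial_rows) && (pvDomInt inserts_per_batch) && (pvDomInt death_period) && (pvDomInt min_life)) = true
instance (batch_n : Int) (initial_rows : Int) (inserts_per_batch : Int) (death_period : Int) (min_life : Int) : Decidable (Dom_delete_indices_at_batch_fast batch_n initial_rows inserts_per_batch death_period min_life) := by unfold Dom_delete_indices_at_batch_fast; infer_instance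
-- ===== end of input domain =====

-- B replaces A's birth-tick loop of stride scans plus a final sort by an index-major
-- scan: it enumerates the contiguous window of row indices that can die at batch_n,
-- recovers each index's birth tick by floor division, filters by the death equation,
-- and emits the result already sorted (no sort step); equivalence is proved for
-- nonnegative initial_rows (Pre_).

-- ===== PORT A =====
-- helper max_k_at_batch, literal
def max_k_at_batch (batch_n : Int) (initial_rows : Int) (inserts_per_batch : Int) : Int :=
  if batch_n ≤ 0 then initial_rows else initial_rows + batch_n * inserts_per_batch

-- the 'while k < k_end: result.append(k); k += dp' loop of A (dp > 0 passed as a proof for termination)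
def strideA (dp : Int) (hdp : 0 < dp) (k k_end : Int) (acc : List Int) : List Int :=
  if _h : k < k_end then strideA dp hdp (k + dp) k_end (acc ++ [k]) else acc
termination_by (k_end - k).toNat
decreasing_by omega

-- literal port of A (death_period is an Int here, so math.isinf is False)
def delete_indices_at_batch_fast (batch_n : Int) (initial_rows : Int) (inserts_per_batch : Int) (death_period : Int) (min_life : Int) : List Int :=
  if batch_n ≤ 0 then []
  else
    let dp := death_period
    if hdp : dp ≤ 0 then []
    else
      let upper_k := max_k_at_batch batch_n initial_rows inserts_per_batch
      let max_birth := batch_n - min_life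
      if max_birth < 0 then []
      else
        let result := (PySem.List.pyRange 0 (max_birth + 1) 1).foldl (fun res t_b =>
          let target_mod := batch_n - t_b - min_life
          if target_mod < 0 ∨ target_mod ≥ dp then res
          else
            -- the tail of the loop body, shared by the t_b == 0 and t_b ≠ 0 branches
            let rest := fun (k_start k_end0 : Int) =>
              let k_end := min k_end0 upper_k
              let first_k :=
                if k_start ≤ 0 then target_mod
                else
                  let remainder := PySem.Int.mod k_start dp
                  if remainder ≤ target_mod then k_start + (target_mod - remainder)
                  else k_start + (dp - remainder + target_mod)
              strideA dp (by omega) first_k k_end res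
            if t_b == 0 then rest 0 initial_rows
            else if inserts_per_batch ≤ 0 then res
            else rest (initial_rows + (t_b - 1) * inserts_per_batch)
                      (initial_rows + (t_b - 1) * inserts_per_batch + inserts_per_batch)) []
        PySem.List.sorted result (fun x => x) false

-- ===== PORT B =====
def delete_indices_at_batch_fast_alt (batch_n : Int) (initial_rows : Int) (inserts_per_batch : Int) (death_period : Int) (min_life : Int) : List Int :=
  if batch_n ≤ 0 then []
  else
    let dp := death_period
    if dp ≤ 0 then []
    else
      let need := batch_n - min_life
      if need < 0 then []
      else
        let upper_k := initial_rows + batch_n * inserts_per_batch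
        let out := if need < dp then
            (PySem.List.pyRange 0 (min initial_rows upper_k) 1).filter
              (fun k => PySem.Int.mod k dp == need)
          else []
        if 0 < inserts_per_batch then
          let t_lo := max 1 (need - dp + 1)
          if t_lo ≤ need then
            out ++ (PySem.List.pyRange (initial_rows + (t_lo - 1) * inserts_per_batch)
                      (min (initial_rows + need * inserts_per_batch) upper_k) 1).filter
                (fun k => 1 + PySem.Int.floordiv (k - initial_rows) inserts_per_batch
                            + PySem.Int.mod k dp == need)
          else out
        else out

-- ===== PRECONDITION & SPEC =====
-- Pre_ restricts to the natural domain of a nonnegative initial row count; for negative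
-- initial_rows (a nonsensical table size) A's stride start `first_k = target_mod` taken
-- whenever a block start is ≤ 0 emits indices that lie outside that birth block, an
-- artefact B does not reproduce.
def Pre_delete_indices_at_batch_fast (batch_n : Int) (initial_rows : Int) (inserts_per_batch : Int) (death_period : Int) (min_life : Int) : Prop :=
  0 ≤ initial_rows
instance (batch_n : Int) (initial_rows : Int) (inserts_per_batch : Int) (death_period : Int) (min_life : Int) : Decidable (Pre_delete_indices_at_batch_fast batch_n initial_rows inserts_per_batch death_period min_life) := by unfold Pre_delete_indices_at_batch_fast; infer_instance

def pvWitness_delete_indices_at_batch_fast : Int × Int × Int × Int × Int := (3, 5, 2, 4, 1)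

def Spec_delete_indices_at_batch_fast (batch_n : Int) (initial_rows : Int) (inserts_per_batch : Int) (death_period : Int) (min_life : Int) (out : List Int) : Prop := out = delete_indices_at_batch_fast_alt batch_n initial_rows inserts_per_batch death_period min_life
instance (batch_n : Int) (initial_rows : Int) (inserts_per_batch : Int) (death_period : Int) (min_life : Int) (out : List Int) : Decidable (Spec_delete_indices_at_batch_fast batch_n initial_rows inserts_per_batch death_period min_life out) := by unfold Spec_delete_indices_at_batch_fast; infer_instance

-- ===== CLAIM (what is proved, stated in full; the proofs are below) =====
def Claim_equal_delete_indices_at_batch_fast : Prop := ∀ (batch_n : Int) (initial_rows : Int) (inserts_per_batch : Int) (death_period : Int) (min_life : Int), Dom_delete_indices_at_batch_fast batch_n initial_rows inserts_per_batch death_period min_life → Pre_delete_indices_at_batch_fast batch_n initial_rows inserts_per_batch death_period min_life → Spec_delete_indices_at_batch_fast batch_n initial_rows inserts_per_batch death_period min_life (delete_indices_at_batch_fast batch_n initial_rows inserts_per_batch death_period min_life)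

-- ===== LEMMAS AND PROOFS =====

-- A's per-birth-tick emission, as a list (proof-side helper)
def blkA (ir ipb dp need upper : Int) (hdp : 0 < dp) (t : Int) : List Int :=
  if need - t < 0 ∨ need - t ≥ dp then []
  else if t = 0 then PySem.List.pyRange need (min ir upper) dp
  else if ipb ≤ 0 then []
  else
    let ks := ir + (t - 1) * ipb
    let tgt := need - t
    let fk := if ks ≤ 0 then tgt
              else if PySem.Int.mod ks dp ≤ tgt then ks + (tgt - PySem.Int.mod ks dp)
              else ks + (dp - PySem.Int.mod ks dp + tgt)
    PySem.List.pyRange fk (min (ks + ipb) upper) dp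

-- the death predicate both programs enumerate
def Pdel (ir ipb dp need upper x : Int) : Prop :=
  (0 ≤ need ∧ need < dp ∧ 0 ≤ x ∧ x < min ir upper ∧ x % dp = need) ∨
  (∃ t, 1 ≤ t ∧ 0 ≤ need - t ∧ need - t < dp ∧ 0 < ipb ∧
    ir + (t - 1) * ipb ≤ x ∧ x < min (ir + (t - 1) * ipb + ipb) upper ∧ x % dp = need - t)

lemma pyRange_pos_nil (k e s : Int) (hs : 0 < s) (h : ¬ k < e) :
    PySem.List.pyRange k e s = [] := by
  rw [PySem.List.pyRange_of_pos _ _ hs]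
  simp [h]

lemma pyRange_pos_cons (k e s : Int) (hs : 0 < s) (h : k < e) :
    PySem.List.pyRange k e s = k :: PySem.List.pyRange (k + s) e s := by
  rw [PySem.List.pyRange_of_pos _ _ hs, PySem.List.pyRange_of_pos _ _ hs, if_pos h]
  have hdiv : (e - k + s - 1) / s = (e - (k + s) + s - 1) / s + 1 := by
    have h2 := Int.add_mul_ediv_right (e - (k + s) + s - 1) 1 (ne_of_gt hs)
    rw [one_mul] at h2
    calc (e - k + s - 1) / s = (e - (k + s) + s - 1 + s) / s := by ring_nf
    _ = _ := h2
  by_cases h2 : k + s < e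
  · rw [if_pos h2, hdiv]
    have hnn : 0 ≤ (e - (k + s) + s - 1) / s := Int.ediv_nonneg (by omega) (by omega)
    have ht : ((e - (k + s) + s - 1) / s + 1).toNat = ((e - (k + s) + s - 1) / s).toNat + 1 := by
      omega
    rw [ht, List.range_succ_eq_map]
    simp only [List.map_cons, List.map_map, Nat.cast_zero, mul_zero, add_zero, List.cons.injEq]
    refine ⟨trivial, List.map_congr_left fun j hj => ?_⟩
    simp only [Function.comp_apply]
    push_cast
    ring
  · rw [if_neg h2]
    have h3 : (e - (k + s) + s - 1) / s = 0 := Int.ediv_eq_zero_of_lt (by omega) (by omega)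
    rw [hdiv, h3]
    simp

lemma strideA_eq (dp : Int) (hdp : 0 < dp) (k e : Int) (acc : List Int) :
    strideA dp hdp k e acc = acc ++ PySem.List.pyRange k e dp := by
  by_cases h : k < e
  · rw [strideA, dif_pos h, strideA_eq dp hdp (k + dp) e, pyRange_pos_cons k e dp hdp h]
    simp
  · rw [strideA, dif_neg h, pyRange_pos_nil k e dp hdp h]
    simp
termination_by (e - k).toNat
decreasing_by omega

-- A's loop, rewritten as a flatMap of blocks
lemma A_eq_flatMap (bn ir ipb dpp ml : Int) (hb : ¬ bn ≤ 0) (hdp : ¬ dpp ≤ 0) (hmb : ¬ bn - ml < 0) :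
    delete_indices_at_batch_fast bn ir ipb dpp ml =
    PySem.List.sorted ((PySem.List.pyRange 0 (bn - ml + 1) 1).flatMap
        (blkA ir ipb dpp (bn - ml) (ir + bn * ipb) (by omega))) (fun x => x) false := by
  unfold delete_indices_at_batch_fast
  rw [if_neg hb, dif_neg hdp, if_neg hmb]
  simp only [max_k_at_batch, if_neg hb]
  congr 1
  rw [PySem.List.foldl_congr_mem _ _
      (fun res t => res ++ blkA ir ipb dpp (bn - ml) (ir + bn * ipb) (by omega) t) []
      ?_]
  · rw [PySem.List.foldl_append_eq_flatMap, List.nil_append]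
  intro acc t _ht
  simp only [blkA]
  by_cases hc : bn - ml - t < 0 ∨ bn - ml - t ≥ dpp
  · rw [if_pos (by omega : bn - t - ml < 0 ∨ bn - t - ml ≥ dpp), if_pos hc, List.append_nil]
  · rw [if_neg (by omega : ¬ (bn - t - ml < 0 ∨ bn - t - ml ≥ dpp)), if_neg hc]
    by_cases h0 : t = 0
    · subst h0
      simp only [BEq.rfl, if_pos]
      rw [strideA_eq]
      norm_num
    · have hbeq : (t == 0) = false := by simp [h0]
      rw [hbeq, if_neg h0]
      simp only [Bool.false_eq_true, if_false]
      by_cases hip : ipb ≤ 0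
      · rw [if_pos hip, if_pos hip, List.append_nil]
      · rw [if_neg hip, if_neg hip, strideA_eq]
        have e1 : bn - t - ml = bn - ml - t := by ring
        rw [e1]

-- membership in a positive-stride range starting at the first k ≥ ks with k % dp = tgt
lemma stride_mem (dp ks tgt e x : Int) (hdp : 0 < dp) (h0 : 0 ≤ tgt) (h1 : tgt < dp) :
    (x ∈ PySem.List.pyRange (ks + (tgt - ks) % dp) e dp) ↔ (ks ≤ x ∧ x < e ∧ x % dp = tgt) := by
  have hr0 : 0 ≤ (tgt - ks) % dp := Int.emod_nonneg _ (by omega)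
  have hr1 : (tgt - ks) % dp < dp := Int.emod_lt_of_pos _ hdp
  have hcong : dp ∣ (tgt - ks) - (tgt - ks) % dp := by
    refine ⟨(tgt - ks) / dp, ?_⟩
    rw [Int.emod_def]
    ring
  rw [PySem.List.mem_pyRange_iff_of_pos hdp]
  have hdvd_iff : dp ∣ x - (ks + (tgt - ks) % dp) ↔ x % dp = tgt := by
    constructor
    · intro h
      have h3 : dp ∣ x - tgt := by
        have e3 : x - tgt = (x - (ks + (tgt - ks) % dp)) - ((tgt - ks) - (tgt - ks) % dp) := by
          ring
        rw [e3]
        exact dvd_sub h hcong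
      have h4 : (x - tgt) % dp = 0 := Int.emod_eq_zero_of_dvd h3
      have h5 : x % dp = tgt % dp := Int.emod_eq_emod_iff_emod_sub_eq_zero.2 h4
      rw [h5, Int.emod_eq_of_lt h0 h1]
    · intro h
      have h4 : (x - tgt) % dp = 0 := by
        rw [← Int.emod_eq_emod_iff_emod_sub_eq_zero, h, Int.emod_eq_of_lt h0 h1]
      have h3 : dp ∣ x - tgt := Int.dvd_of_emod_eq_zero h4
      have e2 : x - (ks + (tgt - ks) % dp) = (x - tgt) + ((tgt - ks) - (tgt - ks) % dp) := by
        ring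
      rw [e2]
      exact dvd_add h3 hcong
  constructor
  · rintro ⟨hle, hlt, hd⟩
    exact ⟨by omega, hlt, hdvd_iff.1 hd⟩
  · rintro ⟨hle, hlt, hmod⟩
    refine ⟨?_, hlt, hdvd_iff.2 hmod⟩
    obtain ⟨c, hc⟩ := hdvd_iff.2 hmod
    have hcge : 0 ≤ c := by
      by_contra hneg
      have hc1 : c ≤ -1 := by omega
      have hmul : dp * c ≤ dp * (-1) := mul_le_mul_of_nonneg_left hc1 (by omega)
      omega
    have hnn : 0 ≤ dp * c := mul_nonneg (by omega) hcge
    omega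

-- A's fk expression equals the canonical first element (for 0 ≤ ks)
lemma fk_canon (dp ks tgt : Int) (hdp : 0 < dp) (h0 : 0 ≤ tgt) (h1 : tgt < dp) (hks : 0 ≤ ks) :
    (if ks ≤ 0 then tgt
     else if PySem.Int.mod ks dp ≤ tgt then ks + (tgt - PySem.Int.mod ks dp)
     else ks + (dp - PySem.Int.mod ks dp + tgt)) = ks + (tgt - ks) % dp := by
  by_cases hks0 : ks ≤ 0
  · have hz : ks = 0 := by omega
    subst hz
    rw [if_pos (le_refl (0 : Int))]
    simp [Int.emod_eq_of_lt h0 h1]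
  · rw [if_neg hks0, PySem.Int.mod_eq_emod_of_pos hdp]
    have hr0 : 0 ≤ ks % dp := Int.emod_nonneg ks (by omega)
    have hr1 : ks % dp < dp := Int.emod_lt_of_pos ks hdp
    have hsub : (tgt - ks) % dp = (tgt - ks % dp) % dp := by
      conv_lhs => rw [Int.sub_emod]
      conv_rhs => rw [Int.sub_emod]
      rw [Int.emod_emod_of_dvd _ (dvd_refl dp)]
    by_cases h : ks % dp ≤ tgt
    · rw [if_pos h, hsub]
      have h5 := Int.emod_eq_of_lt (a := tgt - ks % dp) (b := dp) (by omega) (by omega)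
      omega
    · rw [if_neg h, hsub]
      have h5 := Int.add_emod_right (tgt - ks % dp) dp
      have h6 := Int.emod_eq_of_lt (a := tgt - ks % dp + dp) (b := dp) (by omega) (by omega)
      omega

lemma mem_blkA (ir ipb dp need upper : Int) (hdp : 0 < dp) (hir : 0 ≤ ir) (t x : Int)
    (ht : 0 ≤ t) :
    x ∈ blkA ir ipb dp need upper hdp t ↔
      ((t = 0 ∧ 0 ≤ need ∧ need < dp ∧ 0 ≤ x ∧ x < min ir upper ∧ x % dp = need) ∨
       (t ≥ 1 ∧ 0 ≤ need - t ∧ need - t < dp ∧ 0 < ipb ∧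
        ir + (t - 1) * ipb ≤ x ∧ x < min (ir + (t - 1) * ipb + ipb) upper ∧ x % dp = need - t)) := by
  unfold blkA
  by_cases hc : need - t < 0 ∨ need - t ≥ dp
  · rw [if_pos hc]
    simp only [List.not_mem_nil, false_iff]
    rintro (⟨h0, _, _, _, _, _⟩ | ⟨_, _, _, _, _, _, _⟩) <;> omega
  · rw [if_neg hc]
    by_cases h0 : t = 0
    · subst h0
      rw [if_pos rfl]
      have hneed : need = 0 + (need - 0) % dp := by
        rw [Int.emod_eq_of_lt (by omega) (by omega)]
        ring
      rw [show PySem.List.pyRange need (min ir upper) dp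
            = PySem.List.pyRange (0 + (need - 0) % dp) (min ir upper) dp by rw [← hneed],
          stride_mem dp 0 need (min ir upper) x hdp (by omega) (by omega)]
      constructor
      · rintro ⟨ha, hb', hm⟩
        exact Or.inl ⟨rfl, by omega, by omega, ha, hb', by omega⟩
      · rintro (⟨_, _, _, ha, hb', hm⟩ | ⟨h1, _, _, _, _, _, _⟩)
        · exact ⟨ha, hb', by omega⟩
        · omega
    · rw [if_neg h0]
      by_cases hip : ipb ≤ 0
      · rw [if_pos hip]
        simp only [List.not_mem_nil, false_iff]
        rintro (⟨he, _, _, _, _, _⟩ | ⟨_, _, _, hp, _, _, _⟩) <;> omega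
      · rw [if_neg hip]
        have hks : 0 ≤ ir + (t - 1) * ipb := by
          have hm : 0 ≤ (t - 1) * ipb := mul_nonneg (by omega) (by omega)
          omega
        simp only []
        rw [fk_canon dp (ir + (t - 1) * ipb) (need - t) hdp (by omega) (by omega) hks,
            stride_mem dp (ir + (t - 1) * ipb) (need - t) _ x hdp (by omega) (by omega)]
        constructor
        · rintro ⟨ha, hb', hm⟩
          exact Or.inr ⟨by omega, by omega, by omega, by omega, ha, hb', hm⟩
        · rintro (⟨he, _, _, _, _, _⟩ | ⟨_, _, _, _, ha, hb', hm⟩)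
          · omega
          · exact ⟨ha, hb', hm⟩

-- membership in A's flatMap of blocks is exactly the death predicate
lemma mem_A_iff (bn ir ipb ml : Int) (dpp : Int) (hdp : 0 < dpp) (hir : 0 ≤ ir)
    (hmb : 0 ≤ bn - ml) (x : Int) :
    (x ∈ (PySem.List.pyRange 0 (bn - ml + 1) 1).flatMap
        (blkA ir ipb dpp (bn - ml) (ir + bn * ipb) hdp)) ↔
      Pdel ir ipb dpp (bn - ml) (ir + bn * ipb) x := by
  rw [List.mem_flatMap]
  constructor
  · rintro ⟨t, htr, hxb⟩
    rw [PySem.List.mem_pyRange_one] at htr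
    rw [mem_blkA ir ipb dpp _ _ hdp hir t x htr.1] at hxb
    rcases hxb with ⟨_, h⟩ | ⟨h1, h2, h3, h4, h5, h6, h7⟩
    · exact Or.inl h
    · exact Or.inr ⟨t, h1, h2, h3, h4, h5, h6, h7⟩
  · rintro (⟨h1, h2, h3, h4, h5⟩ | ⟨t, h1, h2, h3, h4, h5, h6, h7⟩)
    · refine ⟨0, ?_, ?_⟩
      · rw [PySem.List.mem_pyRange_one]; omega
      · rw [mem_blkA ir ipb dpp _ _ hdp hir 0 x (le_refl 0)]
        exact Or.inl ⟨rfl, h1, h2, h3, h4, h5⟩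
    · refine ⟨t, ?_, ?_⟩
      · rw [PySem.List.mem_pyRange_one]; omega
      · rw [mem_blkA ir ipb dpp _ _ hdp hir t x (by omega)]
        exact Or.inr ⟨h1, h2, h3, h4, h5, h6, h7⟩

-- membership in B is exactly the death predicate
lemma mem_B_iff (bn ir ipb dpp ml : Int) (hb : ¬ bn ≤ 0) (hdp : ¬ dpp ≤ 0)
    (hmb : ¬ bn - ml < 0) (hir : 0 ≤ ir) (x : Int) :
    (x ∈ delete_indices_at_batch_fast_alt bn ir ipb dpp ml) ↔
      Pdel ir ipb dpp (bn - ml) (ir + bn * ipb) x := by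
  have hdp' : 0 < dpp := by omega
  unfold delete_indices_at_batch_fast_alt
  rw [if_neg hb, if_neg hdp, if_neg hmb]
  simp only []
  have hinit : ∀ y : Int,
      (y ∈ (if bn - ml < dpp then
          (PySem.List.pyRange 0 (min ir (ir + bn * ipb)) 1).filter
            (fun k => PySem.Int.mod k dpp == bn - ml)
        else [])) ↔
      (0 ≤ bn - ml ∧ bn - ml < dpp ∧ 0 ≤ y ∧ y < min ir (ir + bn * ipb) ∧ y % dpp = bn - ml) := by
    intro y
    by_cases hnd : bn - ml < dpp
    · rw [if_pos hnd, List.mem_filter, PySem.List.mem_pyRange_one,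
          PySem.Int.mod_eq_emod_of_pos hdp']
      simp only [beq_iff_eq]
      omega
    · rw [if_neg hnd]
      simp only [List.not_mem_nil, false_iff]
      omega
  have hins : ∀ y : Int, (0 < ipb) → (max 1 (bn - ml - dpp + 1) ≤ bn - ml) →
      ((y ∈ (PySem.List.pyRange (ir + (max 1 (bn - ml - dpp + 1) - 1) * ipb)
              (min (ir + (bn - ml) * ipb) (ir + bn * ipb)) 1).filter
            (fun k => 1 + PySem.Int.floordiv (k - ir) ipb + PySem.Int.mod k dpp == bn - ml)) ↔
        (∃ t, 1 ≤ t ∧ 0 ≤ bn - ml - t ∧ bn - ml - t < dpp ∧ 0 < ipb ∧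
          ir + (t - 1) * ipb ≤ y ∧ y < min (ir + (t - 1) * ipb + ipb) (ir + bn * ipb) ∧
          y % dpp = bn - ml - t)) := by
    intro y hipb htlo
    rw [List.mem_filter, PySem.List.mem_pyRange_one, PySem.Int.mod_eq_emod_of_pos hdp']
    simp only [beq_iff_eq]
    have hnn : 0 ≤ (max 1 (bn - ml - dpp + 1) - 1) * ipb := mul_nonneg (by omega) (by omega)
    have hmod0 := Int.emod_nonneg y (show dpp ≠ 0 by omega)
    have hmod1 := Int.emod_lt_of_pos y hdp'
    constructor
    · rintro ⟨⟨hlo, hhi⟩, hpred⟩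
      rw [lt_min_iff] at hhi
      have hbr : PySem.Int.floordiv (y - ir) ipb * ipb ≤ y - ir ∧
          y - ir < (PySem.Int.floordiv (y - ir) ipb + 1) * ipb :=
        (PySem.Int.floordiv_eq_iff_of_pos hipb).1 rfl
      set q := PySem.Int.floordiv (y - ir) ipb with hq
      have hq0 : 0 ≤ q := by
        by_contra hneg
        have hc1 : q + 1 ≤ 0 := by omega
        have hmul : (q + 1) * ipb ≤ 0 * ipb := mul_le_mul_of_nonneg_right hc1 (by omega)
        rw [zero_mul] at hmul
        omega
      have e1 : (q + 1 - 1) * ipb = q * ipb := by ring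
      have e2 : (q + 1) * ipb = q * ipb + ipb := by ring
      refine ⟨q + 1, by omega, by omega, by omega, hipb, by omega, ?_, by omega⟩
      rw [lt_min_iff]
      exact ⟨by omega, hhi.2⟩
    · rintro ⟨t, h1, h2, h3, _, h5, h6, h7⟩
      rw [lt_min_iff] at h6
      have hql : PySem.Int.floordiv (y - ir) ipb = t - 1 := by
        rw [PySem.Int.floordiv_eq_iff_of_pos hipb]
        have e3 : (t - 1 + 1) * ipb = (t - 1) * ipb + ipb := by ring
        constructor
        · omega
        · omega
      refine ⟨⟨?_, ?_⟩, ?_⟩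
      · have hle : (max 1 (bn - ml - dpp + 1) - 1) * ipb ≤ (t - 1) * ipb :=
          mul_le_mul_of_nonneg_right (by omega) (by omega)
        omega
      · rw [lt_min_iff]
        have e3 : (t - 1) * ipb + ipb = t * ipb := by ring
        have hle : t * ipb ≤ (bn - ml) * ipb :=
          mul_le_mul_of_nonneg_right (by omega) (by omega)
        exact ⟨by omega, h6.2⟩
      · rw [hql]
        omega
  by_cases hipb : 0 < ipb
  · rw [if_pos hipb]
    by_cases htlo : max 1 (bn - ml - dpp + 1) ≤ bn - ml
    · rw [if_pos htlo, List.mem_append]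
      unfold Pdel
      rw [hinit x, hins x hipb htlo]
    · rw [if_neg htlo]
      unfold Pdel
      rw [hinit x]
      constructor
      · intro h
        exact Or.inl h
      · rintro (h | ⟨t, h1, h2, h3, _, h5, h6, h7⟩)
        · exact h
        · omega
  · rw [if_neg hipb]
    unfold Pdel
    rw [hinit x]
    constructor
    · intro h
      exact Or.inl h
    · rintro (h | ⟨t, _, _, _, h4, _, _, _⟩)
      · exact h
      · omega

-- strictly increasing lists with the same members are equal
lemma sorted_ext : ∀ (l1 l2 : List Int), l1.Pairwise (· < ·) → l2.Pairwise (· < ·) →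
    (∀ x, x ∈ l1 ↔ x ∈ l2) → l1 = l2
  | [], [], _, _, _ => rfl
  | [], b :: t2, _, _, h => absurd ((h b).2 (List.mem_cons_self)) (by simp)
  | a :: t, [], _, _, h => absurd ((h a).1 (List.mem_cons_self)) (by simp)
  | a :: t, b :: t2, h1, h2, h => by
    have ha : a = b ∨ a ∈ t2 := List.mem_cons.1 ((h a).1 List.mem_cons_self)
    have hb : b = a ∨ b ∈ t := List.mem_cons.1 ((h b).2 List.mem_cons_self)
    have hab : a = b := by
      rcases ha with h' | h'
      · exact h'
      · rcases hb with h'' | h''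
        · omega
        · have h1' := List.rel_of_pairwise_cons h1 h''
          have h2' := List.rel_of_pairwise_cons h2 h'
          omega
    subst hab
    have htail : t = t2 := by
      apply sorted_ext t t2 h1.tail h2.tail
      intro x
      constructor
      · intro hx
        have hx2 := (h x).1 (List.mem_cons_of_mem _ hx)
        rcases List.mem_cons.1 hx2 with h' | h'
        · exact absurd (h' ▸ List.rel_of_pairwise_cons h1 hx) (lt_irrefl _)
        · exact h'
      · intro hx
        have hx2 := (h x).2 (List.mem_cons_of_mem _ hx)
        rcases List.mem_cons.1 hx2 with h' | h'
        · exact absurd (h' ▸ List.rel_of_pairwise_cons h2 hx) (lt_irrefl _)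
        · exact h'
    rw [htail]

lemma pairwise_pyRange_pos (a b s : Int) (hs : 0 < s) :
    (PySem.List.pyRange a b s).Pairwise (· < ·) := by
  rw [PySem.List.pyRange_of_pos _ _ hs]
  refine List.Pairwise.map _ (fun k l (hkl : k < l) => ?_) (List.pairwise_lt_range)
  have hkl' : (k : Int) < l := by exact_mod_cast hkl
  nlinarith

-- A's flatMap is strictly increasing
lemma pairwise_A (bn ir ipb ml : Int) (dpp : Int) (hdp : 0 < dpp) (hir : 0 ≤ ir) :
    ((PySem.List.pyRange 0 (bn - ml + 1) 1).flatMap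
        (blkA ir ipb dpp (bn - ml) (ir + bn * ipb) hdp)).Pairwise (· < ·) := by
  rw [List.pairwise_flatMap]
  constructor
  · intro t _
    unfold blkA
    split_ifs <;> first
      | exact List.Pairwise.nil
      | exact pairwise_pyRange_pos _ _ _ hdp
  · refine List.Pairwise.imp_of_mem ?_ (PySem.List.pairwise_lt_pyRange_one 0 (bn - ml + 1))
    intro s t hs ht hst x hx y hy
    rw [PySem.List.mem_pyRange_one] at hs ht
    rw [mem_blkA ir ipb dpp _ _ hdp hir s x hs.1] at hx
    rw [mem_blkA ir ipb dpp _ _ hdp hir t y ht.1] at hy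
    rcases hx with ⟨hs0, _, _, _, hxlt, _⟩ | ⟨hs1, _, _, hips, hxlo, hxlt, _⟩ <;>
      rcases hy with ⟨ht0, _, _, hyge, _, _⟩ | ⟨ht1, _, _, hipt, hylo, _, _⟩
    · omega
    · rw [lt_min_iff] at hxlt
      have hnn : 0 ≤ (t - 1) * ipb := mul_nonneg (by omega) (by omega)
      omega
    · omega
    · rw [lt_min_iff] at hxlt
      have e1 : (s - 1) * ipb + ipb = s * ipb := by ring
      have h2 : s * ipb ≤ (t - 1) * ipb :=
        mul_le_mul_of_nonneg_right (by omega) (by omega)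
      omega

-- B is strictly increasing
lemma pairwise_B (bn ir ipb dpp ml : Int) (hb : ¬ bn ≤ 0) (hdp : ¬ dpp ≤ 0)
    (hmb : ¬ bn - ml < 0) (hir : 0 ≤ ir) :
    (delete_indices_at_batch_fast_alt bn ir ipb dpp ml).Pairwise (· < ·) := by
  unfold delete_indices_at_batch_fast_alt
  rw [if_neg hb, if_neg hdp, if_neg hmb]
  simp only []
  have hpinit : (if bn - ml < dpp then
      (PySem.List.pyRange 0 (min ir (ir + bn * ipb)) 1).filter
        (fun k => PySem.Int.mod k dpp == bn - ml)
    else []).Pairwise (· < ·) := by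
    by_cases hnd : bn - ml < dpp
    · rw [if_pos hnd]
      exact (PySem.List.pairwise_lt_pyRange_one _ _).filter _
    · rw [if_neg hnd]
      exact List.Pairwise.nil
  by_cases hipb : 0 < ipb
  · rw [if_pos hipb]
    by_cases htlo : max 1 (bn - ml - dpp + 1) ≤ bn - ml
    · rw [if_pos htlo, List.pairwise_append]
      refine ⟨hpinit, (PySem.List.pairwise_lt_pyRange_one _ _).filter _, ?_⟩
      intro x hx y hy
      have hx' : x < min ir (ir + bn * ipb) := by
        by_cases hnd : bn - ml < dpp
        · rw [if_pos hnd, List.mem_filter, PySem.List.mem_pyRange_one] at hx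
          exact hx.1.2
        · rw [if_neg hnd] at hx
          exact absurd hx (List.not_mem_nil)
      have hy' : ir + (max 1 (bn - ml - dpp + 1) - 1) * ipb ≤ y := by
        rw [List.mem_filter, PySem.List.mem_pyRange_one] at hy
        exact hy.1.1
      rw [lt_min_iff] at hx'
      have hnn : 0 ≤ (max 1 (bn - ml - dpp + 1) - 1) * ipb :=
        mul_nonneg (by omega) (by omega)
      omega
    · rw [if_neg htlo]
      exact hpinit
  · rw [if_neg hipb]
    exact hpinit

-- ===== VERDICT (by name: the statement is the Claim_ definition above) =====
theorem delete_indices_at_batch_fast_spec : Claim_equal_delete_indices_at_batch_fast := by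
  intro bn ir ipb dpp ml _hdom hpre
  unfold Spec_delete_indices_at_batch_fast
  have hir : 0 ≤ ir := hpre
  by_cases hb : bn ≤ 0
  · simp [delete_indices_at_batch_fast, delete_indices_at_batch_fast_alt, hb]
  · by_cases hdp : dpp ≤ 0
    · simp [delete_indices_at_batch_fast, delete_indices_at_batch_fast_alt, hb, hdp]
    · by_cases hmb : bn - ml < 0
      · simp [delete_indices_at_batch_fast, delete_indices_at_batch_fast_alt, hb, hdp, hmb]
      · rw [A_eq_flatMap bn ir ipb dpp ml hb hdp hmb]
        have hdp' : 0 < dpp := by omega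
        have hA := pairwise_A bn ir ipb ml dpp (by omega) hir
        have hB := pairwise_B bn ir ipb dpp ml hb hdp hmb hir
        have heq : (PySem.List.pyRange 0 (bn - ml + 1) 1).flatMap
            (blkA ir ipb dpp (bn - ml) (ir + bn * ipb) (by omega)) =
            delete_indices_at_batch_fast_alt bn ir ipb dpp ml := by
          apply sorted_ext _ _ hA hB
          intro x
          rw [mem_A_iff bn ir ipb ml dpp (by omega) hir (by omega) x,
              mem_B_iff bn ir ipb dpp ml hb hdp hmb hir x]
        rw [heq]
        exact PySem.List.sorted_eq_self_of_pairwise _ _ (hB.imp (fun h => le_of_lt h))
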